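-- pv_equiv track=rewrite | github.com/Elfiato/CodeWars | split_table.py | find_all_one_figure_points
-- ===== SOURCE A (Python) =====
-- from collections import deque
-- from math import inf
--
-- def find_all_one_figure_points(first_point, all_point):
--     result = []
--     visited = []
--     horizontal_flag = True
--     que = deque((first_point,))
--     while que:
--         current_point = que.popleft()
--         if current_point not in visited:
--             closest_point = find_closest_points(current_point, all_point)
--             if horizontal_flag:
--                 nxt_point = closest_point[1]
--             else:
--                 nxt_point = closest_point[0]
--             result.append(nxt_point)
--             que.append(nxt_point)
--             visited.append(current_point)
--             horizontal_flag = not horizontal_flag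
--     return result
--
-- def find_closest_points(first_point, all_point):
--     mn_delta_x, mn_delta_y = inf, inf
--     mn_x, mn_y = first_point, first_point
--     for el in all_point:
--         if el != first_point:
--             if el[1] == first_point[1]:
--                 cur_mn_delta_y = abs(el[0] - first_point[0])
--                 if cur_mn_delta_y < mn_delta_y:
--                     mn_delta_y = cur_mn_delta_y
--                     mn_y = el
--             if el[0] == first_point[0]:
--                 cur_mn_delta_x = abs(el[1] - first_point[1])
--                 if cur_mn_delta_x < mn_delta_x:
--                     mn_delta_x = cur_mn_delta_x
--                     mn_x = el
--     return mn_y, mn_x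
-- ===== SOURCE B (Python) =====
-- def _group(all_point, axis):
--     g = {}
--     for el in all_point:
--         g.setdefault(el[axis], []).append(el)
--     return g
--
--
-- def _nearest(p, group, axis):
--     best, best_d = p, None
--     for el in group:
--         if el != p:
--             d = abs(el[axis] - p[axis])
--             if best_d is None or d < best_d:
--                 best_d, best = d, el
--     return best
--
--
-- def find_all_one_figure_points(first_point, all_point):
--     cols = _group(all_point, 0)   # same first coordinate -> walk along axis 1
--     rows = _group(all_point, 1)   # same second coordinate -> walk along axis 0
--     result = []
--     visited = set()
--     current = first_point
--     flag = True
--     while tuple(current) not in visited: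
--         visited.add(tuple(current))
--         if flag:
--             nxt = _nearest(current, cols.get(current[0], []), 1)
--         else:
--             nxt = _nearest(current, rows.get(current[1], []), 0)
--         result.append(nxt)
--         current = nxt
--         flag = not flag
--     return result
-- ===== Notes on version B (the rewrite author's own statement) =====
-- stated objective: alternative
-- what changed: B builds row/column group dicts once and walks with a visited set, scanning only the current point's group per step, instead of A's deque walk that rescans the whole point list and a list-membership visited check at every step.
-- outside the precondition, e.g. on find_all_one_figure_points((), []): A returns [()], B raises IndexError
import Mathlib
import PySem

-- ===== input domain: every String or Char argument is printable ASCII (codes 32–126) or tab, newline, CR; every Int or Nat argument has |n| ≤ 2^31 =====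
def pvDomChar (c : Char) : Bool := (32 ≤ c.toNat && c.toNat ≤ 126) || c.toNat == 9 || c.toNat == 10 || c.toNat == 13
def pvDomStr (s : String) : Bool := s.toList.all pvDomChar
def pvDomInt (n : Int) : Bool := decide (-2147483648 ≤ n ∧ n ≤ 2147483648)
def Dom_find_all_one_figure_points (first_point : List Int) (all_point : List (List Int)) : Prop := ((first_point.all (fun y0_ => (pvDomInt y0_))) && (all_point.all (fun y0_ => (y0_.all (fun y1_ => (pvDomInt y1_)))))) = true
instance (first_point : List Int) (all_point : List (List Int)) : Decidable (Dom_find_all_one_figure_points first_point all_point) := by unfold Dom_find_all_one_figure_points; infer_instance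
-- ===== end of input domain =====

-- B replaces A's walk with a full rescan of all points at every step by precomputed
-- row/column groups (dicts built once) and a visited-set walk that scans only the
-- current point's group; equivalence of the return value is proved on Pre_.

-- ===== PORT A =====

-- 'inf' sentinel: pvLtInf d o = (d < o) where none plays math.inf
def pvLtInf (d : Int) (o : Option Int) : Bool :=
  match o with
  | none => true
  | some m => decide (d < m)

-- scan state: (mn_delta_x, mn_x, mn_delta_y, mn_y)
structure PvFcpSt where
  dx : Option Int
  x : List Int
  dy : Option Int
  y : List Int
  deriving Repr, DecidableEq

-- first 'if' of A's scan loop (updates mn_delta_y / mn_y)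
def pvFcpStepY (fp : List Int) (s : PvFcpSt) (el : List Int) : PvFcpSt :=
  if el.getD 1 0 = fp.getD 1 0 then
    let d := |el.getD 0 0 - fp.getD 0 0|
    if pvLtInf d s.dy then { s with dy := some d, y := el } else s
  else s

-- second 'if' of A's scan loop (updates mn_delta_x / mn_x)
def pvFcpStepX (fp : List Int) (s : PvFcpSt) (el : List Int) : PvFcpSt :=
  if el.getD 0 0 = fp.getD 0 0 then
    let d := |el.getD 1 0 - fp.getD 1 0|
    if pvLtInf d s.dx then { s with dx := some d, x := el } else s
  else s

def pvFcpStep (fp : List Int) (s : PvFcpSt) (el : List Int) : PvFcpSt :=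
  if el = fp then s else pvFcpStepX fp (pvFcpStepY fp s el) el

def find_closest_points (fp : List Int) (all_point : List (List Int)) : List Int × List Int :=
  let s := all_point.foldl (pvFcpStep fp) ⟨none, fp, none, fp⟩
  (s.y, s.x)

-- A's while-loop over the deque; fuel is only a totality guard: the loop runs at most
-- all_point.length + 2 iterations (each non-final iteration marks a fresh point, all
-- from first_point :: all_point, visited), so the fuel below never runs out
def pvLoopA (all_point : List (List Int)) (fuel : Nat) (que visited result : List (List Int))
    (flag : Bool) : List (List Int) :=
  match fuel with
  | 0 => result
  | fuel + 1 =>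
    match que with
    | [] => result
    | current :: rest =>
      if current ∈ visited then pvLoopA all_point fuel rest visited result flag
      else
        let cp := find_closest_points current all_point
        let nxt := if flag then cp.2 else cp.1
        pvLoopA all_point fuel (rest ++ [nxt]) (visited ++ [current]) (result ++ [nxt]) (!flag)

def find_all_one_figure_points (first_point : List Int) (all_point : List (List Int)) : List (List Int) :=
  pvLoopA all_point (all_point.length + 2) [first_point] [] [] true

-- ===== PORT B =====

-- one step of B's _nearest scan; state = (best, best_d)
def pvNearestStep (p : List Int) (axis : Nat) (s : List Int × Option Int) (el : List Int) :
    List Int × Option Int :=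
  if el = p then s
  else
    let d := |el.getD axis 0 - p.getD axis 0|
    match s.2 with
    | none => (el, some d)
    | some m => if d < m then (el, some d) else s

def pvNearest (p : List Int) (group : List (List Int)) (axis : Nat) : List Int :=
  (group.foldl (pvNearestStep p axis) (p, none)).1

-- B's grouping pass: g.setdefault(el[axis], []).append(el)
def pvGroup (axis : Nat) (all_point : List (List Int)) : PySem.Dict Int (List (List Int)) :=
  all_point.foldl (fun g el => g.modify (el.getD axis 0) [] (· ++ [el])) PySem.Dict.empty

-- B's while-loop; the same fuel bound as in A's port (totality guard only)
def pvLoopB (cols rows : PySem.Dict Int (List (List Int))) (fuel : Nat) (current : List Int)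
    (visited result : List (List Int)) (flag : Bool) : List (List Int) :=
  match fuel with
  | 0 => result
  | fuel + 1 =>
    if current ∈ visited then result
    else
      let nxt := if flag then pvNearest current (cols.getD (current.getD 0 0) []) 1
                 else pvNearest current (rows.getD (current.getD 1 0) []) 0
      pvLoopB cols rows fuel nxt (PySem.Set.add visited current) (result ++ [nxt]) (!flag)

def find_all_one_figure_points_alt (first_point : List Int) (all_point : List (List Int)) : List (List Int) :=
  let cols := pvGroup 0 all_point
  let rows := pvGroup 1 all_point
  pvLoopB cols rows (all_point.length + 2) first_point PySem.Set.empty [] true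

-- ===== PRECONDITION & SPEC =====

-- Pre_ excludes inputs containing a point with fewer than 2 coordinates: on those the
-- Python A raises IndexError as soon as its scan inspects any point distinct from the
-- query point, and returns only in degenerate cases where the scan never indexes a
-- point (e.g. empty all_point), while B's grouping pass indexes every point and raises.
def Pre_find_all_one_figure_points (first_point : List Int) (all_point : List (List Int)) : Prop :=
  2 ≤ first_point.length ∧ ∀ p ∈ all_point, 2 ≤ p.length
instance (first_point : List Int) (all_point : List (List Int)) : Decidable (Pre_find_all_one_figure_points first_point all_point) := by unfold Pre_find_all_one_figure_points; infer_instance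

def pvWitness_find_all_one_figure_points : List Int × List (List Int) :=
  ([0, 0], [[0, 1], [1, 1], [1, 0]])

def Spec_find_all_one_figure_points (first_point : List Int) (all_point : List (List Int)) (out : List (List Int)) : Prop := out = find_all_one_figure_points_alt first_point all_point
instance (first_point : List Int) (all_point : List (List Int)) (out : List (List Int)) : Decidable (Spec_find_all_one_figure_points first_point all_point out) := by unfold Spec_find_all_one_figure_points; infer_instance

-- ===== CLAIM (what is proved, stated in full; the proofs are below) =====
def Claim_equal_find_all_one_figure_points : Prop := ∀ (first_point : List Int) (all_point : List (List Int)), Dom_find_all_one_figure_points first_point all_point → Pre_find_all_one_figure_points first_point all_point → Spec_find_all_one_figure_points first_point all_point (find_all_one_figure_points first_point all_point)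

-- ===== LEMMAS AND PROOFS =====

-- the group dict holds exactly the (order-preserving) filter of all_point by coordinate
theorem pvGroup_getD (axis : Nat) (all_point : List (List Int)) (k : Int) :
    (pvGroup axis all_point).getD k [] =
      all_point.filter (fun el => el.getD axis 0 == k) := by
  have h1 : pvGroup axis all_point =
      (all_point.map (fun el => (el.getD axis 0, el))).foldl
        (fun d p => d.modify p.1 [] (· ++ [p.2])) PySem.Dict.empty := by
    simp only [List.foldl_map]
    rfl
  rw [h1, PySem.Dict.getD_foldl_modify_append, PySem.Dict.getD_empty, List.nil_append,
    List.filter_map, List.map_map]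
  simp [Function.comp_def]

-- projections of the two sub-steps of A's scan
theorem pvFcpStepY_x (fp : List Int) (s : PvFcpSt) (el : List Int) :
    (pvFcpStepY fp s el).x = s.x := by
  unfold pvFcpStepY; dsimp only; split_ifs <;> rfl

theorem pvFcpStepY_dx (fp : List Int) (s : PvFcpSt) (el : List Int) :
    (pvFcpStepY fp s el).dx = s.dx := by
  unfold pvFcpStepY; dsimp only; split_ifs <;> rfl

theorem pvFcpStepX_y (fp : List Int) (s : PvFcpSt) (el : List Int) :
    (pvFcpStepX fp s el).y = s.y := by
  unfold pvFcpStepX; dsimp only; split_ifs <;> rfl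

theorem pvFcpStepX_dy (fp : List Int) (s : PvFcpSt) (el : List Int) :
    (pvFcpStepX fp s el).dy = s.dy := by
  unfold pvFcpStepX; dsimp only; split_ifs <;> rfl

-- one step of A's scan, projected to (mn_x, mn_delta_x), is one step of B's nearest
-- fold when el is in the column group, and a no-op otherwise
theorem pv_step_x (p : List Int) (s : PvFcpSt) (el : List Int) :
    ((pvFcpStep p s el).x, (pvFcpStep p s el).dx) =
      if el.getD 0 0 == p.getD 0 0 then pvNearestStep p 1 (s.x, s.dx) el else (s.x, s.dx) := by
  unfold pvFcpStep pvFcpStepX pvNearestStep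
  dsimp only
  by_cases hep : el = p
  · simp [hep]
  · simp only [if_neg hep]
    rcases hdxv : s.dx with _ | m <;> by_cases h0 : el.getD 0 0 = p.getD 0 0 <;>
      split_ifs <;>
        simp_all [pvLtInf, pvFcpStepY_x, pvFcpStepY_dx, List.getD_eq_getElem?_getD]

theorem pv_step_y (p : List Int) (s : PvFcpSt) (el : List Int) :
    ((pvFcpStep p s el).y, (pvFcpStep p s el).dy) =
      if el.getD 1 0 == p.getD 1 0 then pvNearestStep p 0 (s.y, s.dy) el else (s.y, s.dy) := by
  unfold pvFcpStep pvFcpStepY pvNearestStep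
  dsimp only
  by_cases hep : el = p
  · simp [hep]
  · simp only [if_neg hep]
    rcases hdyv : s.dy with _ | m <;> by_cases h1 : el.getD 1 0 = p.getD 1 0 <;>
      split_ifs <;>
        simp_all [pvLtInf, pvFcpStepX_y, pvFcpStepX_dy, List.getD_eq_getElem?_getD]

-- x-projection of A's whole scan = B's nearest fold over the column group
theorem pv_fold_x (p : List Int) :
    ∀ (l : List (List Int)) (s : PvFcpSt),
      ((l.foldl (pvFcpStep p) s).x, (l.foldl (pvFcpStep p) s).dx) =
        (l.filter (fun el => el.getD 0 0 == p.getD 0 0)).foldl (pvNearestStep p 1) (s.x, s.dx)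
  | [], _ => rfl
  | el :: l, s => by
    simp only [List.foldl_cons, List.filter_cons]
    by_cases h0 : (el.getD 0 0 == p.getD 0 0) = true
    · rw [if_pos h0, List.foldl_cons, pv_fold_x p l _, pv_step_x, if_pos h0]
    · rw [if_neg h0, pv_fold_x p l _, pv_step_x, if_neg h0]

theorem pv_fold_y (p : List Int) :
    ∀ (l : List (List Int)) (s : PvFcpSt),
      ((l.foldl (pvFcpStep p) s).y, (l.foldl (pvFcpStep p) s).dy) =
        (l.filter (fun el => el.getD 1 0 == p.getD 1 0)).foldl (pvNearestStep p 0) (s.y, s.dy)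
  | [], _ => rfl
  | el :: l, s => by
    simp only [List.foldl_cons, List.filter_cons]
    by_cases h1 : (el.getD 1 0 == p.getD 1 0) = true
    · rw [if_pos h1, List.foldl_cons, pv_fold_y p l _, pv_step_y, if_pos h1]
    · rw [if_neg h1, pv_fold_y p l _, pv_step_y, if_neg h1]

-- A's mn_x is B's nearest point in the column group, A's mn_y the one in the row group
theorem fcp_snd (p : List Int) (all_point : List (List Int)) :
    (find_closest_points p all_point).2 =
      pvNearest p ((pvGroup 0 all_point).getD (p.getD 0 0) []) 1 := by
  have h := pv_fold_x p all_point ⟨none, p, none, p⟩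
  simp only [find_closest_points, pvNearest, pvGroup_getD]
  exact congrArg Prod.fst h

theorem fcp_fst (p : List Int) (all_point : List (List Int)) :
    (find_closest_points p all_point).1 =
      pvNearest p ((pvGroup 1 all_point).getD (p.getD 1 0) []) 0 := by
  have h := pv_fold_y p all_point ⟨none, p, none, p⟩
  simp only [find_closest_points, pvNearest, pvGroup_getD]
  exact congrArg Prod.fst h

theorem pvSetAddSnoc {v : List (List Int)} {c : List Int} (hc : c ∉ v) :
    PySem.Set.add v c = v ++ [c] := by
  simp [PySem.Set.add, PySem.Set.contains, hc]

theorem pvLoopA_nilq (all_point : List (List Int)) (fuel : Nat) (v r : List (List Int))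
    (f : Bool) : pvLoopA all_point fuel [] v r f = r := by
  cases fuel <;> rfl

-- the two walks agree step for step (A's deque always holds exactly one point)
theorem pv_loops_agree (all_point : List (List Int)) :
    ∀ (fuel : Nat) (c : List Int) (v r : List (List Int)) (f : Bool),
      pvLoopA all_point fuel [c] v r f =
        pvLoopB (pvGroup 0 all_point) (pvGroup 1 all_point) fuel c v r f
  | 0, _, _, _, _ => rfl
  | fuel + 1, c, v, r, f => by
    rw [pvLoopA, pvLoopB]
    by_cases hc : c ∈ v
    · rw [if_pos hc, if_pos hc, pvLoopA_nilq]
    · rw [if_neg hc, if_neg hc]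
      have hn : (if f then (find_closest_points c all_point).2
            else (find_closest_points c all_point).1) =
          (if f then pvNearest c ((pvGroup 0 all_point).getD (c.getD 0 0) []) 1
           else pvNearest c ((pvGroup 1 all_point).getD (c.getD 1 0) []) 0) := by
        cases f <;> simp only [if_true, if_false, Bool.false_eq_true, fcp_snd, fcp_fst]
      dsimp only
      rw [hn, pvSetAddSnoc hc, List.nil_append]
      exact pv_loops_agree all_point fuel _ _ _ _

-- ===== VERDICT (by name: the statement is the Claim_ definition above) =====
theorem find_all_one_figure_points_spec : Claim_equal_find_all_one_figure_points := by
  intro first_point all_point _ _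
  unfold Spec_find_all_one_figure_points find_all_one_figure_points find_all_one_figure_points_alt
  exact pv_loops_agree all_point (all_point.length + 2) first_point [] [] true
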